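-- pv_equiv track=rewrite | github.com/howiealeshire/youtube-scraping | parse_json.py | build_follower_count_dict_and_return
-- ===== SOURCE A (Python) =====
-- def build_follower_count_dict_and_return(csv_dict_list):
--     def get_id_follower_pairs(csv_dict_list):
--         id_bio_pairs_dict = {}
--         for row in csv_dict_list:
--             user_id = row.get('user_id')
--             bio = row.get('followerCount')
--             if bio is None:
--                 bio = row.get('num_followers')
--             if user_id not in id_bio_pairs_dict.keys() and bio is not None:
--                 id_bio_pairs_dict[user_id] = bio
--         return id_bio_pairs_dict
--     pairs = get_id_follower_pairs(csv_dict_list)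
--
--     for elem in csv_dict_list:
--         elem['followerCount'] = pairs[elem['user_id']]
--
--     return csv_dict_list
-- ===== SOURCE B (Python) =====
-- def build_follower_count_dict_and_return(csv_dict_list):
--     # Single pass with deferred repair: assign each row as soon as its user_id's
--     # first follower value is known; rows seen before their value are deferred
--     # and patched once the pass is over (mutates rows in place, like the original).
--     found = {}
--     deferred = []
--     for elem in csv_dict_list:
--         uid = elem['user_id']
--         if uid not in found:
--             v = elem.get('followerCount')
--             if v is None:
--                 v = elem.get('num_followers')
--             if v is not None:
--                 found[uid] = v
--         if uid in found:
--             elem['followerCount'] = found[uid]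
--         else:
--             deferred.append(elem)
--     for elem in deferred:
--         elem['followerCount'] = found[elem['user_id']]
--     return csv_dict_list
-- ===== Notes on version B (the rewrite author's own statement) =====
-- stated objective: alternative
-- what changed: B replaces A's two staged passes (build the complete first-occurrence dict, then map every row through it) by a single online pass that assigns each row the moment its user_id's value is known, deferring only rows seen before their value and patching exactly those in a final repair step.
import Mathlib
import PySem

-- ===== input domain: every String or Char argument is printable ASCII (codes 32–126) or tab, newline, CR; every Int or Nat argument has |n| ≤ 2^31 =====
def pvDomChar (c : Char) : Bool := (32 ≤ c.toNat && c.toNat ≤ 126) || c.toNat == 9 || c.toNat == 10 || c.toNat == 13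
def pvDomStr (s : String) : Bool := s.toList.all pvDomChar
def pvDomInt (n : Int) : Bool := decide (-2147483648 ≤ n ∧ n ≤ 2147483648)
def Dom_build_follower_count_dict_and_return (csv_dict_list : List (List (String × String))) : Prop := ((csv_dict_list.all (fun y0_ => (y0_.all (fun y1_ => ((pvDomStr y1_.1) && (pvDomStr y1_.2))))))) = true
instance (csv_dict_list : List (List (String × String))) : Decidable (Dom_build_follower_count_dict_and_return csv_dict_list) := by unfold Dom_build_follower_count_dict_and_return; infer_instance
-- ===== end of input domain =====

-- B replaces A's two staged passes (build the full lookup dict, then map every row) by one online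
-- pass that assigns rows as soon as their value is known and repairs only the deferred ones at the
-- end (objective: alternative decomposition, same cost). Both Pythons mutate the rows in place the
-- same way; the theorems here are about the returned value.

-- row.get(k) on a row dict (assoc list, first match)
def pvGetRow (row : List (String × String)) (k : String) : Option String :=
  (row.find? (fun p => p.1 == k)).map (·.2)

-- row[k] = v on a row dict: overwrite in place, new key appends (shared Python semantics)
def pvSetRow (row : List (String × String)) (k : String) (v : String) : List (String × String) :=
  match row with
  | [] => [(k, v)]
  | (a, b) :: rest => if a == k then (k, v) :: rest else (a, b) :: pvSetRow rest k v

-- bio = row.get('followerCount'); if bio is None: bio = row.get('num_followers')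
def pvBio (row : List (String × String)) : Option String :=
  match pvGetRow row "followerCount" with
  | some b => some b
  | none => pvGetRow row "num_followers"

-- ===== PORT A =====
-- one iteration of get_id_follower_pairs's loop (keys are row.get('user_id'), possibly None)
def pvPairsStep (d : PySem.Dict (Option String) String) (row : List (String × String)) :
    PySem.Dict (Option String) String :=
  let user_id := pvGetRow row "user_id"
  match pvBio row with
  | some b => if d.contains user_id then d else d.insert user_id b
  | none => d

def build_follower_count_dict_and_return (csv_dict_list : List (List (String × String))) : List (List (String × String)) :=
  let pairs := csv_dict_list.foldl pvPairsStep PySem.Dict.empty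
  -- for elem in csv_dict_list: elem['followerCount'] = pairs[elem['user_id']]
  csv_dict_list.map (fun elem =>
    match pvGetRow elem "user_id" with
    | some uid =>
      match pairs.get? (some uid) with
      | some v => pvSetRow elem "followerCount" v
      | none => elem        -- KeyError in Python: excluded by Pre_
    | none => elem)         -- KeyError in Python: excluded by Pre_

-- ===== PORT B =====
-- one iteration of B's single pass: state = (found, deferred row indices, rows built so far);
-- the current row's index is out.length
def pvStepB (st : PySem.Dict String String × List Nat × List (List (String × String)))
    (elem : List (String × String)) :
    PySem.Dict String String × List Nat × List (List (String × String)) :=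
  let (found, deferred, out) := st
  match pvGetRow elem "user_id" with
  | none => (found, deferred, out ++ [elem])   -- elem['user_id'] raises KeyError: excluded by Pre_
  | some uid =>
    let found :=
      if found.contains uid then found
      else match pvBio elem with
        | some v => found.insert uid v
        | none => found
    match found.get? uid with
    | some v => (found, deferred, out ++ [pvSetRow elem "followerCount" v])
    | none => (found, deferred ++ [out.length], out ++ [elem])

-- one iteration of B's repair pass over the deferred indices
def pvRepairStep (found : PySem.Dict String String) (o : List (List (String × String))) (j : Nat) :
    List (List (String × String)) :=
  match pvGetRow (o.getD j []) "user_id" with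
  | none => o                                  -- KeyError: excluded by Pre_
  | some uid =>
    match found.get? uid with
    | some v => o.set j (pvSetRow (o.getD j []) "followerCount" v)
    | none => o                                -- found[uid] raises KeyError: excluded by Pre_

def build_follower_count_dict_and_return_alt (csv_dict_list : List (List (String × String))) : List (List (String × String)) :=
  let st := csv_dict_list.foldl pvStepB (PySem.Dict.empty, [], [])
  st.2.1.foldl (pvRepairStep st.1) st.2.2

-- ===== PRECONDITION & SPEC =====
-- Pre_ excludes exactly the inputs on which A raises KeyError: a row without a 'user_id' key, or a
-- row whose user_id has no row at all carrying a followerCount/num_followers value (B raises there too).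
def Pre_build_follower_count_dict_and_return (csv_dict_list : List (List (String × String))) : Prop :=
  ∀ row ∈ csv_dict_list, (pvGetRow row "user_id").isSome ∧
    ∃ row' ∈ csv_dict_list, pvGetRow row' "user_id" = pvGetRow row "user_id" ∧ (pvBio row').isSome
instance (csv_dict_list : List (List (String × String))) : Decidable (Pre_build_follower_count_dict_and_return csv_dict_list) := by unfold Pre_build_follower_count_dict_and_return; infer_instance

def pvWitness_build_follower_count_dict_and_return : (List (List (String × String))) :=
  [[("user_id", "a"), ("num_followers", "7")], [("user_id", "a"), ("x", "y")]]

def Spec_build_follower_count_dict_and_return (csv_dict_list : List (List (String × String))) (out : List (List (String × String))) : Prop := out = build_follower_count_dict_and_return_alt csv_dict_list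
instance (csv_dict_list : List (List (String × String))) (out : List (List (String × String))) : Decidable (Spec_build_follower_count_dict_and_return csv_dict_list out) := by unfold Spec_build_follower_count_dict_and_return; infer_instance

-- ===== CLAIM (what is proved, stated in full; the proofs are below) =====
def Claim_equal_build_follower_count_dict_and_return : Prop := ∀ (csv_dict_list : List (List (String × String))), Dom_build_follower_count_dict_and_return csv_dict_list → Pre_build_follower_count_dict_and_return csv_dict_list → Spec_build_follower_count_dict_and_return csv_dict_list (build_follower_count_dict_and_return csv_dict_list)

-- ===== LEMMAS AND PROOFS =====

-- first row whose user_id is uid and whose bio is non-None (the reference value both programs assign)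
def pvFirstCount (csv : List (List (String × String))) (uid : String) : Option String :=
  match csv with
  | [] => none
  | row :: rest =>
    if pvGetRow row "user_id" = some uid then
      match pvBio row with
      | some v => some v
      | none => pvFirstCount rest uid
    else pvFirstCount rest uid

theorem pvFirstCount_append (P R : List (List (String × String))) (u : String) :
    pvFirstCount (P ++ R) u =
      match pvFirstCount P u with
      | some v => some v
      | none => pvFirstCount R u := by
  induction P with
  | nil => simp [pvFirstCount]
  | cons row rest ih =>
    by_cases hu : pvGetRow row "user_id" = some u
    · rcases hb : pvBio row with _ | b <;> simp [pvFirstCount, hu, hb, ih]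
    · simp [pvFirstCount, hu, ih]

-- the lookup dict built by A's fold answers exactly "first matching row with a non-None bio"
theorem pv_pairs_get (csv : List (List (String × String))) (d : PySem.Dict (Option String) String)
    (uid : String) :
    (csv.foldl pvPairsStep d).get? (some uid)
      = ((d.get? (some uid)).orElse (fun _ => pvFirstCount csv uid)) := by
  induction csv generalizing d with
  | nil => cases h : d.get? (some uid) <;> simp [pvFirstCount, Option.orElse, h]
  | cons row rest ih =>
    simp only [List.foldl_cons]
    rw [ih]
    rcases hb : pvBio row with _ | b
    · by_cases hu : pvGetRow row "user_id" = some uid <;>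
        simp [pvPairsStep, pvFirstCount, hu, hb]
    · by_cases hu : pvGetRow row "user_id" = some uid
      · by_cases hc : d.contains (some uid)
        · rcases hg : d.get? (some uid) with _ | w
          · exfalso
            rw [PySem.Dict.contains_eq_isSome_get?, hg] at hc
            simp at hc
          · simp [pvPairsStep, hb, hu, hc, hg, Option.orElse]
        · have hg : d.get? (some uid) = none := by
            rw [PySem.Dict.contains_eq_isSome_get?] at hc
            cases hg' : d.get? (some uid) with
            | none => rfl
            | some w => rw [hg'] at hc; simp at hc
          simp [pvPairsStep, pvFirstCount, hb, hc, hg, hu, Option.orElse]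
      · have hne : (some uid : Option String) ≠ pvGetRow row "user_id" := fun h => hu h.symm
        by_cases hc : d.contains (pvGetRow row "user_id")
        · simp [pvPairsStep, pvFirstCount, hb, hc, hu]
        · simp [pvPairsStep, pvFirstCount, hb, hc, hu,
            PySem.Dict.get?_insert_of_ne d b hne]

-- a matching row with a non-None bio makes pvFirstCount succeed
theorem pv_firstCount_isSome (csv : List (List (String × String))) (uid : String)
    (h : ∃ row' ∈ csv, pvGetRow row' "user_id" = some uid ∧ (pvBio row').isSome) :
    (pvFirstCount csv uid).isSome := by
  induction csv with
  | nil => simp at h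
  | cons row rest ih =>
    unfold pvFirstCount
    rcases h with ⟨row', hmem, hid, hbio⟩
    rcases List.mem_cons.mp hmem with rfl | hmem'
    · rcases hb : pvBio row' with _ | b
      · rw [hb] at hbio; simp at hbio
      · simp [hid]
    · by_cases hu : pvGetRow row "user_id" = some uid
      · rcases hb : pvBio row with _ | b
        · simp only [hu, if_pos]
          exact ih ⟨row', hmem', hid, hbio⟩
        · simp [hu]
      · simp only [if_neg hu]
        exact ih ⟨row', hmem', hid, hbio⟩

-- invariant of B's single pass over a prefix P whose rows all carry a user_id
theorem pvB_inv (P : List (List (String × String)))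
    (huid : ∀ row ∈ P, (pvGetRow row "user_id").isSome) :
    (∀ u, (P.foldl pvStepB (PySem.Dict.empty, [], [])).1.get? u = pvFirstCount P u) ∧
    (P.foldl pvStepB (PySem.Dict.empty, [], [])).2.2.length = P.length ∧
    (∀ j ∈ (P.foldl pvStepB (PySem.Dict.empty, [], [])).2.1, j < P.length) ∧
    (P.foldl pvStepB (PySem.Dict.empty, [], [])).2.1.Nodup ∧
    (∀ j, j < P.length →
      (j ∈ (P.foldl pvStepB (PySem.Dict.empty, [], [])).2.1 →
        (P.foldl pvStepB (PySem.Dict.empty, [], [])).2.2.getD j [] = P.getD j []) ∧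
      (j ∉ (P.foldl pvStepB (PySem.Dict.empty, [], [])).2.1 →
        ∃ u v, pvGetRow (P.getD j []) "user_id" = some u ∧ pvFirstCount P u = some v ∧
          (P.foldl pvStepB (PySem.Dict.empty, [], [])).2.2.getD j [] =
            pvSetRow (P.getD j []) "followerCount" v)) := by
  induction P using List.reverseRecOn with
  | nil =>
    refine ⟨fun u => ?_, rfl, by simp, by simp, by simp⟩
    simp [pvFirstCount, PySem.Dict.get?_empty]
  | append_singleton P e ih =>
    obtain ⟨Hf, Hlen, Hlt, Hnd, Hmain⟩ :=
      ih (fun row hr => huid row (List.mem_append_left _ hr))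
    obtain ⟨u0, hu0⟩ := Option.isSome_iff_exists.mp
      (huid e (List.mem_append_right _ (List.mem_cons_self ..)))
    rw [List.foldl_append]
    set st := P.foldl pvStepB (PySem.Dict.empty, [], []) with hst
    obtain ⟨f, ds, o⟩ := st
    simp only at Hf Hlen Hlt Hnd Hmain
    -- getD facts about the extended lists
    have hgetP : ∀ j, j < P.length → (P ++ [e]).getD j [] = P.getD j [] := by
      intro j hj; simp [List.getD, List.getElem?_append_left hj]
    have hgetE : (P ++ [e]).getD P.length [] = e := by
      simp [List.getD, List.getElem?_concat_length]
    have hgetO : ∀ (x : List (String × String)) j, j < P.length →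
        (o ++ [x]).getD j [] = o.getD j [] := by
      intro x j hj
      simp [List.getD, List.getElem?_append_left (show j < o.length by omega)]
    have hgetOE : ∀ (x : List (String × String)), (o ++ [x]).getD P.length [] = x := by
      intro x
      rw [show P.length = o.length from Hlen.symm]
      simp [List.getD, List.getElem?_concat_length]
    simp only [List.foldl_cons, List.foldl_nil]
    unfold pvStepB
    simp only [hu0]
    set f' := (if f.contains u0 then f
      else match pvBio e with
        | some v => f.insert u0 v
        | none => f) with hf'
    -- the updated dict answers pvFirstCount over the extended prefix
    have hf'get : ∀ u, f'.get? u = pvFirstCount (P ++ [e]) u := by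
      intro u
      rw [pvFirstCount_append, hf']
      by_cases hc : f.contains u0 = true
      · rw [if_pos hc]
        have hsome : (pvFirstCount P u0).isSome := by
          rw [← Hf u0, ← PySem.Dict.contains_eq_isSome_get?]; exact hc
        obtain ⟨w, hw⟩ := Option.isSome_iff_exists.mp hsome
        by_cases hu : u = u0
        · subst hu; rw [Hf u, hw]
        · have hne' : pvGetRow e "user_id" ≠ some u := by
            rw [hu0]; exact fun h => hu (Option.some.inj h).symm
          have h1 : pvFirstCount [e] u = none := by simp [pvFirstCount, hne']
          rw [Hf u]
          cases hp : pvFirstCount P u <;> simp [hp, h1]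
      · rw [if_neg hc]
        have hnone : pvFirstCount P u0 = none := by
          rw [← Hf u0]
          rw [PySem.Dict.contains_eq_isSome_get?] at hc
          cases hg : f.get? u0 with
          | none => rfl
          | some w => rw [hg] at hc; simp at hc
        rcases hb : pvBio e with _ | v
        · simp only [hb]
          by_cases hu : u = u0
          · subst hu
            rw [Hf u, hnone]
            simp [pvFirstCount, hu0, hb]
          · have hne' : pvGetRow e "user_id" ≠ some u := by
              rw [hu0]; exact fun h => hu (Option.some.inj h).symm
            have h1 : pvFirstCount [e] u = none := by simp [pvFirstCount, hne']
            rw [Hf u]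
            cases hp : pvFirstCount P u <;> simp [hp, h1]
        · simp only [hb]
          by_cases hu : u = u0
          · subst hu
            rw [PySem.Dict.get?_insert_self, hnone]
            simp [pvFirstCount, hu0, hb]
          · have hne' : pvGetRow e "user_id" ≠ some u := by
              rw [hu0]; exact fun h => hu (Option.some.inj h).symm
            have h1 : pvFirstCount [e] u = none := by simp [pvFirstCount, hne']
            rw [PySem.Dict.get?_insert_of_ne f v hu, Hf u]
            cases hp : pvFirstCount P u <;> simp [hp, h1]
    -- case split on whether the current row's value is known
    rcases hres : f'.get? u0 with _ | v
    · -- deferred: value still unknown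
      simp only [hres]
      refine ⟨hf'get, by simpa using Hlen, ?_, ?_, ?_⟩
      · intro j hj
        simp only [List.mem_append, List.mem_singleton] at hj
        rcases hj with hj | hj
        · have := Hlt j hj; simp; omega
        · subst hj; simp [Hlen]
      · refine List.Nodup.append Hnd (List.nodup_singleton _) ?_
        intro a ha hb
        have hb' : a = o.length := by simpa using hb
        subst hb'
        exact absurd (Hlt _ ha) (by omega)
      · intro j hj
        simp only [List.length_append, List.length_singleton] at hj
        by_cases hje : j = P.length
        · subst hje
          constructor
          · intro _
            rw [hgetOE, hgetE]
          · intro hmem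
            exact absurd (List.mem_append_right _ (by simp [Hlen])) hmem
        · have hjP : j < P.length := by omega
          have hmem_iff : j ∈ ds ++ [o.length] ↔ j ∈ ds := by
            simp [Hlen, hje]
          constructor
          · intro hmem
            rw [hgetO _ _ hjP, hgetP _ hjP]
            exact (Hmain j hjP).1 (hmem_iff.mp hmem)
          · intro hmem
            obtain ⟨u, v, h1, h2, h3⟩ := (Hmain j hjP).2 (fun h => hmem (hmem_iff.mpr h))
            refine ⟨u, v, by rw [hgetP _ hjP]; exact h1, ?_, ?_⟩
            · rw [pvFirstCount_append, h2]
            · rw [hgetO _ _ hjP, hgetP _ hjP]; exact h3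
    · -- assigned immediately
      simp only [hres]
      refine ⟨hf'get, by simpa using Hlen, ?_, Hnd, ?_⟩
      · intro j hj
        have := Hlt j hj; simp; omega
      · intro j hj
        simp only [List.length_append, List.length_singleton] at hj
        by_cases hje : j = P.length
        · subst hje
          constructor
          · intro hmem
            exact absurd (Hlt _ hmem) (by omega)
          · intro _
            refine ⟨u0, v, by rw [hgetE]; exact hu0, ?_, ?_⟩
            · rw [← hf'get u0]; exact hres
            · rw [hgetOE, hgetE]
        · have hjP : j < P.length := by omega
          constructor
          · intro hmem
            rw [hgetO _ _ hjP, hgetP _ hjP]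
            exact (Hmain j hjP).1 hmem
          · intro hmem
            obtain ⟨u, v', h1, h2, h3⟩ := (Hmain j hjP).2 hmem
            refine ⟨u, v', by rw [hgetP _ hjP]; exact h1, ?_, ?_⟩
            · rw [pvFirstCount_append, h2]
            · rw [hgetO _ _ hjP, hgetP _ hjP]; exact h3

-- pvRepairStep leaves every other index unchanged
theorem pvRepairStep_getD_ne (found : PySem.Dict String String)
    (o : List (List (String × String))) (j m : Nat) (h : m ≠ j) :
    (pvRepairStep found o j).getD m [] = o.getD m [] := by
  unfold pvRepairStep
  rcases hg : pvGetRow (o.getD j []) "user_id" with _ | uid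
  · simp only [hg]
  · simp only [hg]
    rcases hf : found.get? uid with _ | v
    · rfl
    · simp [List.getD, List.getElem?_set_ne (by omega : j ≠ m)]

-- pvRepairStep at its own index computes the patched row
theorem pvRepairStep_getD_self (found : PySem.Dict String String)
    (o : List (List (String × String))) (j : Nat) :
    (pvRepairStep found o j).getD j [] =
      match pvGetRow (o.getD j []) "user_id" with
      | none => o.getD j []
      | some uid =>
        match found.get? uid with
        | some v => pvSetRow (o.getD j []) "followerCount" v
        | none => o.getD j [] := by
  unfold pvRepairStep
  rcases hg : pvGetRow (o.getD j []) "user_id" with _ | uid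
  · simp only [hg]
  · simp only [hg]
    rcases hf : found.get? uid with _ | v
    · simp only [hf]
    · simp only [hf]
      have hlt : j < o.length := by
        by_contra hge
        have : o.getD j [] = [] := List.getD_eq_default _ _ (by omega)
        rw [this] at hg
        simp [pvGetRow] at hg
      simp [List.getD, List.getElem?_set_self, hlt]

-- the repair fold patches exactly the listed indices
theorem pv_repair (found : PySem.Dict String String) (k : Nat) :
    ∀ (ds : List Nat) (o : List (List (String × String))), ds.Nodup →
      (ds.foldl (pvRepairStep found) o).getD k [] =
        if k ∈ ds then
          match pvGetRow (o.getD k []) "user_id" with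
          | none => o.getD k []
          | some uid =>
            match found.get? uid with
            | some v => pvSetRow (o.getD k []) "followerCount" v
            | none => o.getD k []
        else o.getD k [] := by
  intro ds
  induction ds with
  | nil => intro o _; simp
  | cons j rest ih =>
    intro o hnd
    have hj : j ∉ rest := (List.nodup_cons.mp hnd).1
    have hnd' : rest.Nodup := (List.nodup_cons.mp hnd).2
    simp only [List.foldl_cons]
    rw [ih _ hnd']
    by_cases hk : k = j
    · subst hk
      rw [if_neg hj, pvRepairStep_getD_self, if_pos (List.mem_cons_self ..)]
    · rw [pvRepairStep_getD_ne found o j k hk]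
      by_cases hm : k ∈ rest
      · rw [if_pos hm, if_pos (List.mem_cons_of_mem _ hm)]
      · rw [if_neg hm, if_neg (by simp [hk, hm])]

theorem pv_repair_length (found : PySem.Dict String String) :
    ∀ (ds : List Nat) (o : List (List (String × String))),
      (ds.foldl (pvRepairStep found) o).length = o.length := by
  intro ds
  induction ds with
  | nil => intro o; rfl
  | cons j rest ih =>
    intro o
    simp only [List.foldl_cons]
    rw [ih]
    simp only [pvRepairStep]
    rcases hg : pvGetRow (o.getD j []) "user_id" with _ | uid
    · rfl
    · rcases hf : found.get? uid with _ | v <;> simp [hf]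

-- two row lists agree when they have the same length and the same row at every index
theorem pv_list_ext (l1 l2 : List (List (String × String))) (hlen : l1.length = l2.length)
    (h : ∀ k, k < l1.length → l1.getD k [] = l2.getD k []) : l1 = l2 := by
  apply List.ext_getElem hlen
  intro k h1 h2
  have := h k h1
  simpa [List.getD, List.getElem?_eq_getElem, h1, h2] using this

-- ===== VERDICT (by name: the statement is the Claim_ definition above) =====
theorem build_follower_count_dict_and_return_spec : Claim_equal_build_follower_count_dict_and_return := by
  intro csv _hdom hpre
  unfold Spec_build_follower_count_dict_and_return
  have huid : ∀ row ∈ csv, (pvGetRow row "user_id").isSome := fun row hr => (hpre row hr).1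
  obtain ⟨Hf, Hlen, Hlt, Hnd, Hmain⟩ := pvB_inv csv huid
  have hfc : ∀ row ∈ csv, ∃ u v, pvGetRow row "user_id" = some u ∧ pvFirstCount csv u = some v := by
    intro row hr
    obtain ⟨h1, row', hr', heq, hb⟩ := hpre row hr
    obtain ⟨u, hu⟩ := Option.isSome_iff_exists.mp h1
    have hs : (pvFirstCount csv u).isSome :=
      pv_firstCount_isSome csv u ⟨row', hr', by rw [heq, hu], hb⟩
    obtain ⟨v, hv⟩ := Option.isSome_iff_exists.mp hs
    exact ⟨u, v, hu, hv⟩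
  unfold build_follower_count_dict_and_return build_follower_count_dict_and_return_alt
  show _ = (csv.foldl pvStepB (PySem.Dict.empty, [], [])).2.1.foldl
      (pvRepairStep (csv.foldl pvStepB (PySem.Dict.empty, [], [])).1)
      (csv.foldl pvStepB (PySem.Dict.empty, [], [])).2.2
  apply pv_list_ext
  · rw [List.length_map, pv_repair_length, Hlen]
  · intro k hk
    rw [List.length_map] at hk
    have hmem : csv.getD k [] ∈ csv := by
      rw [List.getD_eq_getElem _ _ hk]
      exact List.getElem_mem _
    obtain ⟨u, v, hu, hv⟩ := hfc _ hmem
    have hpair : (csv.foldl pvPairsStep PySem.Dict.empty).get? (some u) = some v := by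
      rw [pv_pairs_get, PySem.Dict.get?_empty]
      simpa [Option.orElse] using hv
    have hmap : (csv.map (fun elem =>
        match pvGetRow elem "user_id" with
        | some uid =>
          match (csv.foldl pvPairsStep PySem.Dict.empty).get? (some uid) with
          | some v => pvSetRow elem "followerCount" v
          | none => elem
        | none => elem)).getD k []
        = match pvGetRow (csv.getD k []) "user_id" with
          | some uid =>
            match (csv.foldl pvPairsStep PySem.Dict.empty).get? (some uid) with
            | some v => pvSetRow (csv.getD k []) "followerCount" v
            | none => csv.getD k []
          | none => csv.getD k [] := by
      simp [List.getD, List.getElem?_map, List.getElem?_eq_getElem hk]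
    rw [hmap, hu]
    simp only [hpair]
    rw [pv_repair (csv.foldl pvStepB (PySem.Dict.empty, [], [])).1 k
        (csv.foldl pvStepB (PySem.Dict.empty, [], [])).2.1
        (csv.foldl pvStepB (PySem.Dict.empty, [], [])).2.2 Hnd]
    by_cases hkd : k ∈ (csv.foldl pvStepB (PySem.Dict.empty, [], [])).2.1
    · rw [if_pos hkd, (Hmain k hk).1 hkd, hu]
      simp only [Hf u, hv]
    · rw [if_neg hkd]
      obtain ⟨u', v', hu', hv', ho⟩ := (Hmain k hk).2 hkd
      rw [ho]
      have : u' = u := Option.some.inj (hu'.symm.trans hu)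
      subst this
      have : v' = v := Option.some.inj (hv'.symm.trans hv)
      subst this
      rfl
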